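-- pv_equiv track=rewrite | github.com/kiipo0623/Algorithm-2021 | 1005/room.py | solution
-- ===== SOURCE A (Python) =====
-- import collections
--
-- def solution(arrows):
--     answer = 0
--     move = [(-1, 0), (-1,1), (0, 1), (1, 1), (1, 0), (1, -1), (0, -1), (-1, -1)]
--     now = (0, 0)
--
--     visited = collections.defaultdict(int)
--     visited_dir = collections.defaultdict(int)
--
--     queue = collections.deque([now])
--     for i in arrows:
--         for _ in range(2):
--             next = (now[0] + move[i][0], now[1] + move[i][1])
--             queue.append(next)
--
--             now = next
--
--     now = queue.popleft()
--     visited[now] = 1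
--
--     while queue:
--         next = queue.popleft()
--
--         if visited[next] == 1:
--             if visited_dir[(now, next)] == 0:
--                 answer += 1
--         else:
--             visited[next] = 1
--
--         visited_dir[(now, next)] = 1
--         visited_dir[(next, now)] = 1
--         now = next
--
--     return answer
-- ===== SOURCE B (Python) =====
-- def solution(arrows):
--     move = [(-1, 0), (-1, 1), (0, 1), (1, 1), (1, 0), (1, -1), (0, -1), (-1, -1)]
--     now = (0, 0)
--     visited = {now}
--     edges = set()
--     answer = 0
--     for i in arrows:
--         dx, dy = move[i]
--         for _ in range(2):
--             nxt = (now[0] + dx, now[1] + dy)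
--             if nxt in visited and (now, nxt) not in edges:
--                 answer += 1
--             else:
--                 visited.add(nxt)
--             edges.add((now, nxt))
--             edges.add((nxt, now))
--             now = nxt
--     return answer
-- ===== Notes on version B (the rewrite author's own statement) =====
-- stated objective: simpler
-- what changed: B drops A's build-then-replay structure (precompute the whole point queue with a deque, then replay it against defaultdict counters): it streams the path in a single pass, keeping now, a visited set of points and a set of used undirected edges, counting a crossing whenever a half-step re-enters a visited point over an unused edge.
import Mathlib
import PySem

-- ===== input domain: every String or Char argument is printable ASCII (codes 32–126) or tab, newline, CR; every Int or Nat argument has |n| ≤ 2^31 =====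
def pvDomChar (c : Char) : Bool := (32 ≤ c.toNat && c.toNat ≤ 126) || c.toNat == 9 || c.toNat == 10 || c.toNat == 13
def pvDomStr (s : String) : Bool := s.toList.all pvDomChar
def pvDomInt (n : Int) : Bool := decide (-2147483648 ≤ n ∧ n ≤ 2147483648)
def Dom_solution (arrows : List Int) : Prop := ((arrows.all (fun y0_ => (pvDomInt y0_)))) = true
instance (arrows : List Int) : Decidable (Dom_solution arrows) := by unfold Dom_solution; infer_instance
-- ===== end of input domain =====

-- B streams the path in one pass with a visited set and an undirected-edge set instead of
-- building the whole point queue first and replaying it (objective: simpler, same cost).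

-- ===== PORT A =====
def pvMove : List (Int × Int) := [(-1, 0), (-1, 1), (0, 1), (1, 1), (1, 0), (1, -1), (0, -1), (-1, -1)]

-- phase 1 of A: build the queue of visited points (queue starts as [now] = [(0,0)])
def pvBuildF (st : (Int × Int) × List (Int × Int)) (i : Int) : (Int × Int) × List (Int × Int) :=
  (List.range 2).foldl (fun st _ =>
    let now := st.1
    let next := (now.1 + (PySem.List.pyGetD pvMove i ((0 : Int), (0 : Int))).1,
                 now.2 + (PySem.List.pyGetD pvMove i ((0 : Int), (0 : Int))).2)
    (next, st.2 ++ [next])) st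

-- phase 2 of A: one iteration of the while loop over the queue
def pvStepA (st : (Int × Int) × PySem.Dict (Int × Int) Int × PySem.Dict ((Int × Int) × (Int × Int)) Int × Int)
    (next : Int × Int) :
    (Int × Int) × PySem.Dict (Int × Int) Int × PySem.Dict ((Int × Int) × (Int × Int)) Int × Int :=
  let now := st.1
  let visited := st.2.1
  let vdir := st.2.2.1
  let answer := st.2.2.2
  let va : (PySem.Dict (Int × Int) Int) × Int :=
    if visited.getD next 0 = 1 then
      (visited, if vdir.getD (now, next) 0 = 0 then answer + 1 else answer)
    else (visited.insert next 1, answer)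
  ((next, va.1, (vdir.insert (now, next) 1).insert (next, now) 1, va.2))

def solution (arrows : List Int) : Int :=
  let built := arrows.foldl pvBuildF (((0 : Int), (0 : Int)), [((0 : Int), (0 : Int))])
  match built.2 with
  | [] => 0   -- unreachable: the queue starts non-empty
  | now :: rest =>
    ((rest.foldl pvStepA (now, PySem.Dict.empty.insert now 1, PySem.Dict.empty, 0)).2.2.2)

-- ===== PORT B =====

-- one half-step of B: next is computed from now and the arrow's delta d on the fly
def pvStepB (st : (Int × Int) × PySem.Set (Int × Int) × PySem.Set ((Int × Int) × (Int × Int)) × Int)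
    (d : Int × Int) :
    (Int × Int) × PySem.Set (Int × Int) × PySem.Set ((Int × Int) × (Int × Int)) × Int :=
  let now := st.1
  let visited := st.2.1
  let edges := st.2.2.1
  let answer := st.2.2.2
  let next := (now.1 + d.1, now.2 + d.2)
  let va : (PySem.Set (Int × Int)) × Int :=
    if next ∈ visited ∧ (now, next) ∉ edges then (visited, answer + 1)
    else (PySem.Set.add visited next, answer)
  (next, va.1, PySem.Set.add (PySem.Set.add edges (now, next)) (next, now), va.2)

def solution_alt (arrows : List Int) : Int :=
  (arrows.foldl (fun st i =>
      let d := PySem.List.pyGetD pvMove i ((0 : Int), (0 : Int))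
      (List.range 2).foldl (fun st _ => pvStepB st d) st)
    (((0 : Int), (0 : Int)), PySem.Set.add PySem.Set.empty ((0 : Int), (0 : Int)), PySem.Set.empty, 0)).2.2.2

-- ===== PRECONDITION & SPEC =====
-- Pre_ excludes exactly the inputs on which Python A raises IndexError: an arrow outside
-- the valid (possibly negative) index range of the 8-entry move table.
def Pre_solution (arrows : List Int) : Prop := ∀ i ∈ arrows, -8 ≤ i ∧ i < 8
instance (arrows : List Int) : Decidable (Pre_solution arrows) := by unfold Pre_solution; infer_instance
def pvWitness_solution : List Int := [0, 1, 2, 6]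

def Spec_solution (arrows : List Int) (out : Int) : Prop := out = solution_alt arrows
instance (arrows : List Int) (out : Int) : Decidable (Spec_solution arrows out) := by unfold Spec_solution; infer_instance

-- ===== CLAIM (what is proved, stated in full; the proofs are below) =====
def Claim_equal_solution : Prop := ∀ (arrows : List Int), Dom_solution arrows → Pre_solution arrows → Spec_solution arrows (solution arrows)

-- ===== LEMMAS AND PROOFS =====

-- the list of points A's phase 1 appends to the queue, starting from `now`
def pvGen (now : Int × Int) : List Int → List (Int × Int)
  | [] => []
  | i :: r =>
    let d := PySem.List.pyGetD pvMove i ((0 : Int), (0 : Int))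
    let p1 := (now.1 + d.1, now.2 + d.2)
    let p2 := (p1.1 + d.1, p1.2 + d.2)
    p1 :: p2 :: pvGen p2 r

-- the point A's phase 1 ends at
def pvEnd (now : Int × Int) : List Int → Int × Int
  | [] => now
  | i :: r =>
    let d := PySem.List.pyGetD pvMove i ((0 : Int), (0 : Int))
    pvEnd ((now.1 + d.1 + d.1, now.2 + d.2 + d.2)) r

lemma pvBuild_eq (arrows : List Int) : ∀ (now : Int × Int) (q : List (Int × Int)),
    arrows.foldl pvBuildF (now, q) = (pvEnd now arrows, q ++ pvGen now arrows) := by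
  induction arrows with
  | nil => intro now q; simp [pvEnd, pvGen]
  | cons i r ih =>
    intro now q
    have hr2 : List.range 2 = [0, 1] := rfl
    simp only [List.foldl_cons, pvBuildF, hr2, List.foldl_cons, List.foldl_nil]
    rw [ih]
    simp [pvGen, pvEnd, List.append_assoc]

-- the simulation relation between A's replay state and B's streaming state
def pvRel (a : (Int × Int) × PySem.Dict (Int × Int) Int × PySem.Dict ((Int × Int) × (Int × Int)) Int × Int)
    (b : (Int × Int) × PySem.Set (Int × Int) × PySem.Set ((Int × Int) × (Int × Int)) × Int) : Prop :=
  a.1 = b.1 ∧ a.2.2.2 = b.2.2.2 ∧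
  (∀ p, a.2.1.getD p 0 = if p ∈ b.2.1 then (1 : Int) else 0) ∧
  (∀ e, a.2.2.1.getD e 0 = if e ∈ b.2.2.1 then (1 : Int) else 0)

lemma pvStep_rel_core (now : Int × Int) (avis : PySem.Dict (Int × Int) Int)
    (adir : PySem.Dict ((Int × Int) × (Int × Int)) Int) (ans : Int)
    (bvis : PySem.Set (Int × Int)) (bedg : PySem.Set ((Int × Int) × (Int × Int))) (d : Int × Int)
    (hvis : ∀ p, avis.getD p 0 = if p ∈ bvis then (1 : Int) else 0)
    (hdir : ∀ e, adir.getD e 0 = if e ∈ bedg then (1 : Int) else 0) :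
    pvRel (pvStepA (now, avis, adir, ans) (now.1 + d.1, now.2 + d.2))
      (pvStepB (now, bvis, bedg, ans) d) := by
  refine ⟨rfl, ?_, ?_, ?_⟩
  · -- answers agree
    simp only [pvStepA, pvStepB]
    by_cases hv : (now.1 + d.1, now.2 + d.2) ∈ bvis
    · by_cases he : (now, (now.1 + d.1, now.2 + d.2)) ∈ bedg
      · simp [hvis, hdir, hv, he]
      · simp [hvis, hdir, hv, he]
    · simp [hvis, hv]
  · -- visited invariant
    intro p
    simp only [pvStepA, pvStepB]
    by_cases hv : (now.1 + d.1, now.2 + d.2) ∈ bvis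
    · by_cases he : (now, (now.1 + d.1, now.2 + d.2)) ∈ bedg
      · simp [hvis, hdir, hv, he]
      · simp [hvis, hdir, hv, he]
    · by_cases hp : p = (now.1 + d.1, now.2 + d.2) <;>
        simp [hvis, hv, hp, PySem.Dict.getD_insert]
  · -- edge invariant
    intro e
    simp only [pvStepA, pvStepB]
    by_cases h1 : e = ((now.1 + d.1, now.2 + d.2), now) <;>
      by_cases h2 : e = (now, (now.1 + d.1, now.2 + d.2)) <;>
      simp [h1, h2, hdir, PySem.Dict.getD_insert, PySem.Set.mem_add]

lemma pvStep_rel (a : (Int × Int) × PySem.Dict (Int × Int) Int × PySem.Dict ((Int × Int) × (Int × Int)) Int × Int)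
    (b : (Int × Int) × PySem.Set (Int × Int) × PySem.Set ((Int × Int) × (Int × Int)) × Int)
    (d : Int × Int) (h : pvRel a b) :
    pvRel (pvStepA a (a.1.1 + d.1, a.1.2 + d.2)) (pvStepB b d) := by
  obtain ⟨anow, avis, adir, aans⟩ := a
  obtain ⟨bnow, bvis, bedg, bans⟩ := b
  obtain ⟨hnow, hans, hvis, hdir⟩ := h
  simp only at hnow hans hvis hdir
  subst hnow; subst hans
  exact pvStep_rel_core anow avis adir aans bvis bedg d hvis hdir

lemma pvMain (arrows : List Int) :
    ∀ (a : (Int × Int) × PySem.Dict (Int × Int) Int × PySem.Dict ((Int × Int) × (Int × Int)) Int × Int)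
      (b : (Int × Int) × PySem.Set (Int × Int) × PySem.Set ((Int × Int) × (Int × Int)) × Int),
      pvRel a b →
      pvRel ((pvGen a.1 arrows).foldl pvStepA a)
        (arrows.foldl (fun st i =>
          let d := PySem.List.pyGetD pvMove i ((0 : Int), (0 : Int))
          (List.range 2).foldl (fun st _ => pvStepB st d) st) b) := by
  induction arrows with
  | nil => intro a b h; simpa [pvGen] using h
  | cons i r ih =>
    intro a b h
    set d := PySem.List.pyGetD pvMove i ((0 : Int), (0 : Int)) with hd
    have h1 := pvStep_rel a b d h
    have h2 := pvStep_rel _ _ d h1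
    exact ih _ _ h2

-- ===== VERDICT (by name: the statement is the Claim_ definition above) =====
theorem solution_spec : Claim_equal_solution := by
  intro arrows _ _
  show solution arrows = solution_alt arrows
  unfold solution solution_alt
  rw [pvBuild_eq]
  simp only [List.singleton_append]
  have hrel : pvRel (((0 : Int), (0 : Int)), PySem.Dict.empty.insert ((0 : Int), (0 : Int)) 1, PySem.Dict.empty, 0)
      (((0 : Int), (0 : Int)), PySem.Set.add PySem.Set.empty ((0 : Int), (0 : Int)), PySem.Set.empty, 0) := by
    refine ⟨rfl, rfl, ?_, ?_⟩
    · intro p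
      by_cases hp : p = ((0 : Int), (0 : Int)) <;>
        simp [hp, PySem.Dict.getD_insert, PySem.Set.empty, PySem.Dict.getD_empty]
    · intro e
      simp [PySem.Set.empty, PySem.Dict.getD_empty]
  exact (pvMain arrows _ _ hrel).2.1
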